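-- pv_equiv track=rewrite | github.com/MrBrantCode/unitest_baseline | mut_generate/mist_train_cf/cf_73376/solution.py | calculate_and_filter
-- ===== SOURCE A (Python) =====
-- def calculate_and_filter(original_list):
--     product = 1
--     new_list = []
--
--     # Iterate through the list
--     for num in original_list:
--
--         # Check if number matches first criterion,
--         # if so, multiply it with the product.
--         if num % 3 == 1:
--             product *= num
--
--         # Check if number matches second criterion,
--         # if so, add it to new list.
--         if num % 2 == 0:
--             new_list.append(num)
--
--     return product, sum(new_list)
-- ===== SOURCE B (Python) =====
-- def calculate_and_filter(original_list):
--     # Divide and conquer: combine (product, sum) of the two halves.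
--     def conquer(seg):
--         if not seg:
--             return (1, 0)
--         if len(seg) == 1:
--             n = seg[0]
--             return (n if n % 3 == 1 else 1, n if n % 2 == 0 else 0)
--         mid = len(seg) // 2
--         p1, s1 = conquer(seg[:mid])
--         p2, s2 = conquer(seg[mid:])
--         return (p1 * p2, s1 + s2)
--     return conquer(original_list)
-- ===== Notes on version B (the rewrite author's own statement) =====
-- stated objective: alternative
-- what changed: Replaces the fused left-to-right accumulator loop (with an intermediate list of evens summed at the end) by a divide-and-conquer tree recursion that splits the list in half and combines the halves' (product, sum) pairs; correct because * and + are associative and commutative.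
import Mathlib
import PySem

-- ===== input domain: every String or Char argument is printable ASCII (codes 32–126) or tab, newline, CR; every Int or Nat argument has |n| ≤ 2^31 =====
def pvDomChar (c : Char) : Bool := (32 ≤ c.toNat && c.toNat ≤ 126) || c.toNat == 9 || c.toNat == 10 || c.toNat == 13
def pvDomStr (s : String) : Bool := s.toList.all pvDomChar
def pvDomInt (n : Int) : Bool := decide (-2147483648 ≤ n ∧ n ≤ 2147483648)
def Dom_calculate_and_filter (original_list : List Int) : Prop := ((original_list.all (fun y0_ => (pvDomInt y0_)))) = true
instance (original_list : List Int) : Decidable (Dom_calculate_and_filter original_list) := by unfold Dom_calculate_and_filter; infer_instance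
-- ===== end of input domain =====

-- ===== PORT A =====
-- B replaces A's fused accumulator loop (intermediate list of evens, summed at the
-- end) by a divide-and-conquer recursion combining (product, sum) of the two halves.
def calculate_and_filter (original_list : List Int) : Int × Int :=
  let st := original_list.foldl (fun (st : Int × List Int) num =>
    let product := if PySem.Int.mod num 3 == 1 then st.1 * num else st.1
    let new_list := if PySem.Int.mod num 2 == 0 then st.2 ++ [num] else st.2
    (product, new_list)) (1, [])
  (st.1, st.2.sum)

-- ===== PORT B =====
-- conquer seg: split in half, recurse, combine elementwise (p1*p2, s1+s2).
def calculate_and_filter_conquer (seg : List Int) : Int × Int :=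
  if h0 : seg = [] then (1, 0)
  else if h1 : seg.length = 1 then
    let n := seg.headI
    (if PySem.Int.mod n 3 == 1 then n else 1, if PySem.Int.mod n 2 == 0 then n else 0)
  else
    let mid := seg.length / 2
    let r1 := calculate_and_filter_conquer (seg.take mid)
    let r2 := calculate_and_filter_conquer (seg.drop mid)
    (r1.1 * r2.1, r1.2 + r2.2)
termination_by seg.length
decreasing_by
  all_goals
    have hlen : 2 ≤ seg.length := by
      cases seg with
      | nil => simp at h0
      | cons a t => cases t with
        | nil => simp at h1
        | cons b u => simp only [List.length_cons]; omega
    simp only [List.length_take, List.length_drop]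
    omega

def calculate_and_filter_alt (original_list : List Int) : Int × Int :=
  calculate_and_filter_conquer original_list

-- ===== PRECONDITION & SPEC =====
def Spec_calculate_and_filter (original_list : List Int) (out : Int × Int) : Prop := out = calculate_and_filter_alt original_list
instance (original_list : List Int) (out : Int × Int) : Decidable (Spec_calculate_and_filter original_list out) := by unfold Spec_calculate_and_filter; infer_instance

-- ===== CLAIM (what is proved, stated in full; the proofs are below) =====
def Claim_equal_calculate_and_filter : Prop := ∀ (original_list : List Int), Dom_calculate_and_filter original_list → Spec_calculate_and_filter original_list (calculate_and_filter original_list)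

-- ===== LEMMAS AND PROOFS =====

-- Both sides are characterised against the same closed form: (prod of the n%3==1
-- filter, sum of the n%2==0 filter).
theorem calculate_and_filter_foldl (l : List Int) (p : Int) (acc : List Int) :
    l.foldl (fun (st : Int × List Int) num =>
      let product := if PySem.Int.mod num 3 == 1 then st.1 * num else st.1
      let new_list := if PySem.Int.mod num 2 == 0 then st.2 ++ [num] else st.2
      (product, new_list)) (p, acc)
    = (p * (l.filter (fun n => PySem.Int.mod n 3 == 1)).prod,
       acc ++ l.filter (fun n => PySem.Int.mod n 2 == 0)) := by
  induction l generalizing p acc with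
  | nil => simp
  | cons x xs ih =>
    simp only [List.foldl_cons, List.filter_cons, ih, Prod.mk.injEq]
    refine ⟨?_, ?_⟩ <;> split_ifs <;>
      simp [mul_comm, mul_assoc, mul_left_comm, List.append_assoc]

theorem calculate_and_filter_conquer_eq_aux : ∀ (n : Nat) (seg : List Int), seg.length = n →
    calculate_and_filter_conquer seg
    = ((seg.filter (fun n => PySem.Int.mod n 3 == 1)).prod,
       (seg.filter (fun n => PySem.Int.mod n 2 == 0)).sum) := by
  intro n
  induction n using Nat.strong_induction_on with
  | _ n ih =>
    intro seg hlen
    rw [calculate_and_filter_conquer]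
    by_cases h0 : seg = []
    · subst h0; simp
    · by_cases h1 : seg.length = 1
      · obtain ⟨m, rfl⟩ : ∃ m, seg = [m] := by
          cases seg with
          | nil => simp at h0
          | cons a t => cases t with
            | nil => exact ⟨a, rfl⟩
            | cons b u => simp at h1
        simp only [h0, h1, dif_pos, List.headI, List.filter_cons,
          List.filter_nil]
        split_ifs <;> simp_all
      · have hlen2 : 2 ≤ seg.length := by
          cases seg with
          | nil => simp at h0
          | cons a t => cases t with
            | nil => simp at h1
            | cons b u => simp only [List.length_cons]; omega
        have ht := ih ((seg.take (seg.length / 2)).length)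
          (by simp only [List.length_take]; omega) _ rfl
        have hd := ih ((seg.drop (seg.length / 2)).length)
          (by simp only [List.length_drop]; omega) _ rfl
        have e3 : List.filter (fun n => PySem.Int.mod n 3 == 1) seg
            = List.filter (fun n => PySem.Int.mod n 3 == 1) (List.take (seg.length / 2) seg)
              ++ List.filter (fun n => PySem.Int.mod n 3 == 1) (List.drop (seg.length / 2) seg) := by
          rw [← List.filter_append, List.take_append_drop]
        have e2 : List.filter (fun n => PySem.Int.mod n 2 == 0) seg
            = List.filter (fun n => PySem.Int.mod n 2 == 0) (List.take (seg.length / 2) seg)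
              ++ List.filter (fun n => PySem.Int.mod n 2 == 0) (List.drop (seg.length / 2) seg) := by
          rw [← List.filter_append, List.take_append_drop]
        simp only [h0, h1, ht, hd, e3, e2, List.prod_append, List.sum_append, dite_false]

theorem calculate_and_filter_conquer_eq (seg : List Int) :
    calculate_and_filter_conquer seg
    = ((seg.filter (fun n => PySem.Int.mod n 3 == 1)).prod,
       (seg.filter (fun n => PySem.Int.mod n 2 == 0)).sum) :=
  calculate_and_filter_conquer_eq_aux seg.length seg rfl

-- ===== VERDICT (by name: the statement is the Claim_ definition above) =====
theorem calculate_and_filter_spec : Claim_equal_calculate_and_filter := by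
  intro l _
  unfold Spec_calculate_and_filter calculate_and_filter calculate_and_filter_alt
  simp only [calculate_and_filter_foldl, calculate_and_filter_conquer_eq, one_mul,
    List.nil_append]
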